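-- pv_equiv track=rewrite | github.com/ruihd/LeetCode_Daily | leetcode2573.py | get_zeros
-- ===== SOURCE A (Python) =====
-- def get_zeros(lcp):
--     non_zeros = list()
--
--     for j in range(len(lcp)):
--         for i in range(0,j+1):
--             if lcp[i][j] != 0:
--                 non_zeros.append(i)
--                 break
--
--     count = 0
--     dit = dict()
--     for x in non_zeros:
--         if x not in dit.keys():
--             dit[x] = count
--             count += 1
--
--     for i in range(len(non_zeros)):
--         non_zeros[i] = dit[non_zeros[i]]
--         if non_zeros[i] > ord("z") - ord("a"):
--             return list()
--
--     return non_zeros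
-- ===== SOURCE B (Python) =====
-- def get_zeros(lcp):
--     n = len(lcp)
--     # bottom-up sweep over rows: row i overwrites first[j] for every upper-triangle
--     # nonzero cell, so the last (smallest-i) write wins.
--     first = [None] * n
--     for i in reversed(range(n)):
--         row = lcp[i]
--         for j in range(i, n):
--             if row[j] != 0:
--                 first[j] = i
--     labels = {}
--     out = []
--     for f in first:
--         if f is None:
--             continue
--         if f not in labels:
--             labels[f] = len(labels)
--         lab = labels[f]
--         if lab > 25:
--             return []
--         out.append(lab)
--     return out
-- ===== Notes on version B (the rewrite author's own statement) =====
-- stated objective: alternative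
-- what changed: Replaces A's per-column first-nonzero scan plus two separate relabeling passes by a bottom-up row sweep that overwrites a per-column 'first' array (last = smallest row wins) followed by one fused pass that labels, checks the 25 bound, and emits the output.
-- outside the precondition, e.g. on get_zeros([[1, 2], [5]]): A returns [0, 0], B raises IndexError
import Mathlib
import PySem

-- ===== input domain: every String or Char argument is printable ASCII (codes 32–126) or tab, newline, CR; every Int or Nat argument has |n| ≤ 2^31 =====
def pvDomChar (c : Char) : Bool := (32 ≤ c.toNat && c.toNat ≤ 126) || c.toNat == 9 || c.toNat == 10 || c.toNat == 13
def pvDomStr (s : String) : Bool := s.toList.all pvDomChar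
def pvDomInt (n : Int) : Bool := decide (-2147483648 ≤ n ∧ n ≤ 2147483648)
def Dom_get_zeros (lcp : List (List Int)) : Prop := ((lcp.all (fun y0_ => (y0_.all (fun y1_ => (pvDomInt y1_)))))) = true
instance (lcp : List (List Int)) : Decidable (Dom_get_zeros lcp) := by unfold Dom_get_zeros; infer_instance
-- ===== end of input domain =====

-- B replaces A's column-by-column first-nonzero scan and two relabeling passes by a
-- bottom-up row sweep over a per-column array plus one fused labeling pass (alternative
-- decomposition, same asymptotic cost); equivalence is about the return value only.

-- lcp[i][j]; in range on every access admitted by Pre_, so the defaults are never read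
def pvCell (lcp : List (List Int)) (i j : Nat) : Int := (lcp.getD i []).getD j 0

-- ===== PORT A =====
-- inner loop 'for i in range(0, j+1): if lcp[i][j] != 0: append i; break'
def firstIdxA (lcp : List (List Int)) (j : Nat) : List Nat → Option Int
  | [] => none
  | i :: is => if pvCell lcp i j ≠ 0 then some (Int.ofNat i) else firstIdxA lcp j is

-- third loop with the early 'return list()' modeled as none
def thirdA (dit : PySem.Dict Int Int) : List Int → Option (List Int)
  | [] => some []
  | x :: xs =>
    let v := dit.getD x 0          -- dit[x]; x is always a key here, so getD is exact
    if v > 25 then none            -- ord("z") - ord("a") = 25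
    else match thirdA dit xs with
      | none => none
      | some ys => some (v :: ys)

def get_zeros (lcp : List (List Int)) : List Int :=
  let n := lcp.length
  let non_zeros := (List.range n).foldl
    (fun acc j => match firstIdxA lcp j (List.range (j+1)) with
      | some i => acc ++ [i]
      | none => acc) []
  let cd := non_zeros.foldl
    (fun (s : Int × PySem.Dict Int Int) x =>
      if s.2.contains x then s else (s.1 + 1, s.2.insert x s.1))
    (0, PySem.Dict.empty)
  match thirdA cd.2 non_zeros with
  | none => []
  | some ys => ys

-- ===== PORT B =====
-- inner loop 'for j in range(i, n): if row[j] != 0: first[j] = i'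
def sweepInner (lcp : List (List Int)) (i : Nat) : List Nat → List (Option Int) → List (Option Int)
  | [], arr => arr
  | j :: js, arr =>
    sweepInner lcp i js (if pvCell lcp i j ≠ 0 then arr.set j (some (Int.ofNat i)) else arr)

-- outer loop 'for i in reversed(range(n))'
def sweepRows (lcp : List (List Int)) (n : Nat) : List Nat → List (Option Int) → List (Option Int)
  | [], arr => arr
  | i :: is, arr => sweepRows lcp n is (sweepInner lcp i (List.range' i (n - i)) arr)

-- fused labeling pass, 'return []' modeled as none
def labelLoopB : List (Option Int) → PySem.Dict Int Int → List Int → Option (List Int)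
  | [], _, out => some out
  | none :: fs, labels, out => labelLoopB fs labels out
  | some f :: fs, labels, out =>
    let labels' := if labels.contains f then labels else labels.insert f (labels.size : Int)
    let lab := labels'.getD f 0    -- labels[f]; f is a key of labels', so getD is exact
    if lab > 25 then none
    else labelLoopB fs labels' (out ++ [lab])

def get_zeros_alt (lcp : List (List Int)) : List Int :=
  let n := lcp.length
  let first := sweepRows lcp n (List.range n).reverse (List.replicate n none)
  match labelLoopB first PySem.Dict.empty [] with
  | none => []
  | some out => out

-- ===== PRECONDITION & SPEC =====
-- Pre_ restricts to the function's natural domain, square-or-wider matrices (LeetCode 2573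
-- guarantees a square lcp); on ragged inputs the Pythons raise IndexError on any cell they
-- reach, except that A can return on some ragged inputs when an early nonzero hides the
-- short row behind a break (see cites).
def Pre_get_zeros (lcp : List (List Int)) : Prop := ∀ row ∈ lcp, lcp.length ≤ row.length
instance (lcp : List (List Int)) : Decidable (Pre_get_zeros lcp) := by unfold Pre_get_zeros; infer_instance
def pvWitness_get_zeros : List (List Int) := [[1, 0], [0, 2]]

def Spec_get_zeros (lcp : List (List Int)) (out : List Int) : Prop := out = get_zeros_alt lcp
instance (lcp : List (List Int)) (out : List Int) : Decidable (Spec_get_zeros lcp out) := by unfold Spec_get_zeros; infer_instance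

-- ===== CLAIM (what is proved, stated in full; the proofs are below) =====
def Claim_equal_get_zeros : Prop := ∀ (lcp : List (List Int)), Dom_get_zeros lcp → Pre_get_zeros lcp → Spec_get_zeros lcp (get_zeros lcp)

-- ===== LEMMAS AND PROOFS =====

-- the per-column "first nonzero row" both programs compute
def pvF (lcp : List (List Int)) (j : Nat) : Option Int := firstIdxA lcp j (List.range (j+1))

-- A's second pass, dict part only (count is recovered as the size)
def pvBuild (ns : List Int) (d : PySem.Dict Int Int) : PySem.Dict Int Int :=
  ns.foldl (fun d x => if d.contains x then d else d.insert x (d.size : Int)) d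

-- labelLoopB with the Nones already dropped
def pvLoopI : List Int → PySem.Dict Int Int → List Int → Option (List Int)
  | [], _, out => some out
  | f :: fs, labels, out =>
    let labels' := if labels.contains f then labels else labels.insert f (labels.size : Int)
    let lab := labels'.getD f 0
    if lab > 25 then none
    else pvLoopI fs labels' (out ++ [lab])

theorem pass1_eq (lcp : List (List Int)) (l : List Nat) (acc : List Int) :
    l.foldl (fun acc j => match firstIdxA lcp j (List.range (j+1)) with
      | some i => acc ++ [i] | none => acc) acc = acc ++ l.filterMap (pvF lcp) := by
  induction l generalizing acc with
  | nil => simp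
  | cons j js ih =>
    simp only [List.foldl_cons, List.filterMap_cons, pvF]
    cases h : firstIdxA lcp j (List.range (j+1)) <;> simp [h, ih] <;> rfl

theorem pair_eq (ns : List Int) : ∀ d : PySem.Dict Int Int,
    ns.foldl (fun (s : Int × PySem.Dict Int Int) x =>
        if s.2.contains x then s else (s.1 + 1, s.2.insert x s.1)) ((d.size : Int), d)
      = (((pvBuild ns d).size : Int), pvBuild ns d) := by
  induction ns with
  | nil => intro d; simp [pvBuild]
  | cons x xs ih =>
    intro d
    simp only [List.foldl_cons, pvBuild, List.foldl_cons] at *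
    by_cases h : d.contains x
    · simp [h, ih d]
    · have hs : (d.insert x (d.size : Int)).size = d.size + 1 := by
        simp [PySem.Dict.size_insert, h]
      simp only [h, if_neg, Bool.false_eq_true, not_false_eq_true, if_false]
      have := ih (d.insert x (d.size : Int))
      rw [hs] at this
      push_cast at this ⊢
      convert this using 2 <;> push_cast <;> ring

theorem build_mono (l : List Int) : ∀ (d : PySem.Dict Int Int) (x : Int) (v : Int),
    d.get? x = some v → (pvBuild l d).get? x = some v := by
  induction l with
  | nil => intro d x v h; simpa [pvBuild] using h
  | cons y ys ih =>
    intro d x v h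
    simp only [pvBuild, List.foldl_cons]
    by_cases hc : d.contains y
    · simpa [hc, pvBuild] using ih d x v h
    · simp only [hc, Bool.false_eq_true, if_false]
      apply ih
      by_cases hxy : x = y
      · exfalso
        rw [PySem.Dict.contains_eq_isSome_get?] at hc
        rw [hxy] at h; rw [h] at hc; simp at hc
      · rw [PySem.Dict.get?_insert]; simpa [hxy] using h

theorem fuse (ns : List Int) : ∀ (labels : PySem.Dict Int Int) (out : List Int),
    pvLoopI ns labels out = (thirdA (pvBuild ns labels) ns).map (fun ys => out ++ ys) := by
  induction ns with
  | nil => intro labels out; simp [pvLoopI, thirdA, pvBuild]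
  | cons f fs ih =>
    intro labels out
    obtain ⟨labels', hl'⟩ : ∃ L, (if labels.contains f then labels
        else labels.insert f (labels.size : Int)) = L := ⟨_, rfl⟩
    have hstep : pvBuild (f :: fs) labels = pvBuild fs labels' := by
      simp only [pvBuild, List.foldl_cons]; rw [← hl']
    have hlab : ∃ w, labels'.get? f = some w := by
      by_cases hc : labels.contains f
      · rw [PySem.Dict.contains_eq_isSome_get?] at hc
        cases hg : labels.get? f with
        | none => rw [hg] at hc; simp at hc
        | some w => exact ⟨w, by rw [← hl', if_pos (by rw [PySem.Dict.contains_eq_isSome_get?, hg]; rfl)]; exact hg⟩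
      · exact ⟨(labels.size : Int), by
          rw [← hl', if_neg (by simp [hc]), PySem.Dict.get?_insert_self]⟩
    obtain ⟨w, hw⟩ := hlab
    have hdit : (pvBuild fs labels').get? f = some w := build_mono fs labels' f w hw
    have hgd : (pvBuild fs labels').getD f 0 = labels'.getD f 0 := by
      rw [PySem.Dict.getD_eq_get?_getD, PySem.Dict.getD_eq_get?_getD, hdit, hw]
    simp only [pvLoopI, thirdA, hl', hstep, hgd]
    split_ifs with hgt
    · rfl
    · rw [ih labels' (out ++ [labels'.getD f 0])]
      cases h3 : thirdA (pvBuild fs labels') fs <;> simp [h3]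

theorem labelB_eq (l : List (Option Int)) : ∀ labels out,
    labelLoopB l labels out = pvLoopI (l.filterMap id) labels out := by
  induction l with
  | nil => intro labels out; simp [labelLoopB, pvLoopI]
  | cons o os ih =>
    intro labels out
    cases o with
    | none => simp [labelLoopB, List.filterMap_cons, ih]
    | some f =>
      simp only [labelLoopB, pvLoopI, List.filterMap_cons, id]
      split_ifs with h <;> simp [ih]

theorem firstIdxA_append (lcp : List (List Int)) (j : Nat) (l1 l2 : List Nat) :
    firstIdxA lcp j (l1 ++ l2)
      = match firstIdxA lcp j l1 with
        | some v => some v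
        | none => firstIdxA lcp j l2 := by
  induction l1 with
  | nil => simp [firstIdxA]
  | cons i is ih =>
    simp only [List.cons_append, firstIdxA]
    by_cases h : pvCell lcp i j ≠ 0 <;> simp [h, ih]

theorem sweepInner_length (lcp : List (List Int)) (i : Nat) (l : List Nat) :
    ∀ arr, (sweepInner lcp i l arr).length = arr.length := by
  induction l with
  | nil => intro arr; simp [sweepInner]
  | cons j js ih =>
    intro arr
    simp only [sweepInner, ih]
    split <;> simp

theorem sweepInner_get? (lcp : List (List Int)) (i : Nat) (l : List Nat) :
    ∀ arr, l.Nodup → (∀ x ∈ l, x < arr.length) → ∀ j,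
      (sweepInner lcp i l arr)[j]?
        = if j ∈ l ∧ pvCell lcp i j ≠ 0 then some (some (Int.ofNat i)) else arr[j]? := by
  induction l with
  | nil => intro arr _ _ j; simp [sweepInner]
  | cons j' js ih =>
    intro arr hnd hlt j
    have hnd' : js.Nodup := hnd.of_cons
    have hj'lt : j' < arr.length := hlt j' (by simp)
    simp only [sweepInner]
    set arr' := if pvCell lcp i j' ≠ 0 then arr.set j' (some (Int.ofNat i)) else arr with harr'
    have hlen' : arr'.length = arr.length := by rw [harr']; split <;> simp
    rw [ih arr' hnd' (fun x hx => by rw [hlen']; exact hlt x (by simp [hx])) j]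
    by_cases hmem : j ∈ js
    · have hne : j ≠ j' := fun he => (List.nodup_cons.mp hnd).1 (he ▸ hmem)
      by_cases hc : pvCell lcp i j ≠ 0
      · simp [hmem, hc]
      · have : arr'[j]? = arr[j]? := by
          rw [harr']; split
          · rw [List.getElem?_set_ne (fun h => hne h.symm)]
          · rfl
        simp [hmem, hc, this]
    · by_cases hjj : j = j'
      · subst hjj
        by_cases hc : pvCell lcp i j ≠ 0
        · have : arr'[j]? = some (some (Int.ofNat i)) := by
            rw [harr', if_pos hc, List.getElem?_set_self]; simp [hj'lt]
          simp [hc, this]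
        · have : arr'[j]? = arr[j]? := by rw [harr', if_neg hc]
          simp [hmem, hc, this]
      · have : arr'[j]? = arr[j]? := by
          rw [harr']; split
          · rw [List.getElem?_set_ne (fun h => hjj h.symm)]
          · rfl
        simp [hmem, hjj, this]

theorem sweepRows_get? (lcp : List (List Int)) (n : Nat) (m : Nat) :
    ∀ arr, arr.length = n → ∀ j, j < n →
      (sweepRows lcp n (List.range m).reverse arr)[j]?
        = match firstIdxA lcp j (List.range (min m (j+1))) with
          | some v => some (some v)
          | none => arr[j]? := by
  induction m with
  | zero => intro arr _ j _; simp [sweepRows, firstIdxA]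
  | succ m ih =>
    intro arr hlen j hj
    have hrev : (List.range (m+1)).reverse = m :: (List.range m).reverse := by
      rw [List.range_succ, List.reverse_append]; simp
    rw [hrev]
    simp only [sweepRows]
    set arr' := sweepInner lcp m (List.range' m (n - m)) arr with harr'
    have hlen' : arr'.length = n := by rw [harr', sweepInner_length, hlen]
    rw [ih arr' hlen' j hj]
    have hget : arr'[j]?
        = if (m ≤ j ∧ pvCell lcp m j ≠ 0) then some (some (Int.ofNat m)) else arr[j]? := by
      rw [harr', sweepInner_get? lcp m _ arr (List.nodup_range') (fun x hx => by
        rw [hlen]; have := List.mem_range'_1.mp hx; omega) j]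
      have : j ∈ List.range' m (n - m) ↔ m ≤ j := by
        rw [List.mem_range'_1]; omega
      simp [this]
    by_cases hmj : m ≤ j
    · have h1 : min m (j+1) = m := by omega
      have h2 : min (m+1) (j+1) = m + 1 := by omega
      rw [h1, h2, List.range_succ, firstIdxA_append]
      cases hF : firstIdxA lcp j (List.range m) with
      | some v => simp
      | none =>
        simp only
        by_cases hc : pvCell lcp m j ≠ 0
        · simp [firstIdxA, hc, hget, hmj]
        · simp [firstIdxA, hc, hget, hmj]
    · have h1 : min m (j+1) = j + 1 := by omega
      have h2 : min (m+1) (j+1) = j + 1 := by omega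
      rw [h1, h2]
      cases hF : firstIdxA lcp j (List.range (j+1)) with
      | some v => simp
      | none => simp [hget, hmj]

theorem first_eq_map (lcp : List (List Int)) :
    sweepRows lcp lcp.length (List.range lcp.length).reverse (List.replicate lcp.length none)
      = (List.range lcp.length).map (pvF lcp) := by
  set n := lcp.length
  apply List.ext_getElem?
  intro j
  by_cases hj : j < n
  · rw [sweepRows_get? lcp n n (List.replicate n none) (by simp) j hj]
    have hmin : min n (j+1) = j + 1 := by omega
    rw [hmin, List.getElem?_map]
    rw [show (List.range n)[j]? = some j by simp [hj]]
    cases hF : firstIdxA lcp j (List.range (j+1)) with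
    | some v => simp [pvF, hF]
    | none =>
      simp only [pvF, hF, Option.map_some]
      simp [List.getElem?_replicate, hj]
  · have h1 : (sweepRows lcp n (List.range n).reverse (List.replicate n none)).length = n := by
      have : ∀ (l : List Nat) (arr : List (Option Int)),
          (sweepRows lcp n l arr).length = arr.length := by
        intro l
        induction l with
        | nil => intro arr; simp [sweepRows]
        | cons i is ih => intro arr; simp [sweepRows, ih, sweepInner_length]
      simp [this]
    rw [List.getElem?_eq_none (by omega), List.getElem?_eq_none (by simpa using hj)]

-- ===== VERDICT (by name: the statement is the Claim_ definition above) =====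
theorem get_zeros_spec : Claim_equal_get_zeros := by
  intro lcp _hdom _hpre
  unfold Spec_get_zeros get_zeros get_zeros_alt
  simp only []
  rw [pass1_eq lcp (List.range lcp.length) []]
  have hpair := pair_eq ((List.range lcp.length).filterMap (pvF lcp)) PySem.Dict.empty
  have hsz : (PySem.Dict.empty : PySem.Dict Int Int).size = 0 := by rfl
  rw [first_eq_map lcp, labelB_eq]
  have hfm : ((List.range lcp.length).map (pvF lcp)).filterMap id
      = (List.range lcp.length).filterMap (pvF lcp) := by
    rw [List.filterMap_map]; rfl
  rw [hfm]
  set ns := (List.range lcp.length).filterMap (pvF lcp) with hns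
  rw [fuse ns PySem.Dict.empty []]
  have h2 : (ns.foldl (fun (s : Int × PySem.Dict Int Int) x =>
      if s.2.contains x then s else (s.1 + 1, s.2.insert x s.1)) (0, PySem.Dict.empty)).2
      = pvBuild ns PySem.Dict.empty := by
    have := pair_eq ns PySem.Dict.empty
    rw [hsz] at this
    push_cast at this
    rw [this]
  rw [List.nil_append] at *
  simp only [h2]
  cases h3 : thirdA (pvBuild ns PySem.Dict.empty) ns <;> simp [h3]
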